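-- pv_equiv track=rewrite | github.com/gretalaesch/Python-Scripting | voting.py | mostVotes
-- ===== SOURCE A (Python) =====
-- def mostVotes(votes):
--     ''' Takes as input a list of strings of votes and returns a list of
--     strings of voting choices that appear the most number of times
--     in the original list of strings of votes.
--
--     >>> mostVotes(['Aamir', 'Beth', 'Chris', 'Aamir'])
--     ['Aamir']
--     >>> mostVotes(firstChoiceVotes(readBallot('data/characters.csv')))
--     ['Scarlett OHara', 'Samwise Gamgee']
--     >>> mostVotes(['Greta', 'Greta', 'Carter', 'Charlie', 'Carter', 'Greta', 'Charlie', 'Charlie', 'Greta'])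
--     ['Greta']
--     '''
--     result = []
--     max_so_far = 0
--     for choice in votes:
--         count = votes.count(choice)
--         if count > max_so_far:
--             max_so_far = count #Redefines count
--             result = [choice]
--         elif choice not in result and count == max_so_far:
--             result.append(choice)
--     return result
-- ===== SOURCE B (Python) =====
-- def mostVotes(votes):
--     counts = {}
--     for choice in votes:
--         counts[choice] = counts.get(choice, 0) + 1
--     maxcount = max(counts.values(), default=0)
--     return [choice for choice, count in counts.items() if count == maxcount]
-- ===== Notes on version B (the rewrite author's own statement) =====
-- stated objective: faster
-- what changed: replaces A's single incremental loop (quadratic votes.count per element, running max, reset-and-dedup branches) with a three-phase shape: build a frequency dict in one pass, take max of its values, filter the items for ties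
import Mathlib
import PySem

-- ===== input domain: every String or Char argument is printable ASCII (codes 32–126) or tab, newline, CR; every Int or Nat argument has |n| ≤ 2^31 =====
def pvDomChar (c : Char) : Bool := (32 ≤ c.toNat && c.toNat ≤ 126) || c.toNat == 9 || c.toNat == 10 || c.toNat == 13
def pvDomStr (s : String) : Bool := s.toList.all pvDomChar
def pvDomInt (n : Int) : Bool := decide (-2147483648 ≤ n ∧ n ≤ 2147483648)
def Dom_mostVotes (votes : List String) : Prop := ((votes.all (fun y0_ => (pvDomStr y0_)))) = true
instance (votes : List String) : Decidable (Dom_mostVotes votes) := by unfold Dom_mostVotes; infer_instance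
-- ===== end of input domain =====

-- B replaces A's incremental running-max loop (with its quadratic per-element votes.count)
-- by a one-pass frequency dict, a max over its values, and a filter of its items (faster).


-- ===== PORT A =====
-- the loop body of A's 'for choice in votes', named so the invariant lemmas can cite it
def aStep (votes : List String) (st : List String × Int) (choice : String) : List String × Int :=
  let count : Int := (PySem.List.count votes choice : Int)
  if count > st.2 then ([choice], count)
  else if choice ∉ st.1 ∧ count = st.2 then (st.1 ++ [choice], st.2)
  else st

def mostVotes (votes : List String) : List String :=
  (votes.foldl (aStep votes) ([], 0)).1

-- ===== PORT B =====
def mostVotes_alt (votes : List String) : List String :=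
  let counts : PySem.Dict String Int :=
    votes.foldl (fun d choice => d.modify choice 0 (· + 1)) PySem.Dict.empty
  let maxcount : Int := PySem.List.maxD counts.values (fun v => v) 0
  counts.items.filterMap (fun p => if p.2 = maxcount then some p.1 else none)

-- ===== PRECONDITION & SPEC =====
def Spec_mostVotes (votes : List String) (out : List String) : Prop := out = mostVotes_alt votes
instance (votes : List String) (out : List String) : Decidable (Spec_mostVotes votes out) := by unfold Spec_mostVotes; infer_instance

-- ===== CLAIM (what is proved, stated in full; the proofs are below) =====
def Claim_equal_mostVotes : Prop := ∀ (votes : List String), Dom_mostVotes votes → Spec_mostVotes votes (mostVotes votes)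

-- ===== LEMMAS AND PROOFS =====

-- count of x in the full votes list, as an Int (A consults it on each iteration)
def cnt (votes : List String) (x : String) : Int := (PySem.List.count votes x : Int)

-- A's running maximum after processing the prefix p
def runMax (votes p : List String) : Int :=
  p.foldl (fun m x => max m (cnt votes x)) 0

lemma runMax_append (votes p : List String) (y : String) :
    runMax votes (p ++ [y]) = max (runMax votes p) (cnt votes y) := by
  simp [runMax]

lemma cnt_le_runMax (votes p : List String) {x : String} (hx : x ∈ p) :
    cnt votes x ≤ runMax votes p :=
  (PySem.List.le_foldl_max_int p (cnt votes) 0).2 x hx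

lemma dedup_append_singleton (p : List String) (y : String) :
    PySem.List.dedup (p ++ [y]) =
      if y ∈ p then PySem.List.dedup p else PySem.List.dedup p ++ [y] := by
  rw [PySem.List.dedup_eq_ofList, PySem.List.dedup_eq_ofList,
      PySem.Set.ofList_eq_foldl, PySem.Set.ofList_eq_foldl, List.foldl_append]
  simp only [List.foldl_cons, List.foldl_nil, PySem.Set.add]
  rw [← PySem.Set.ofList_eq_foldl]
  by_cases hy : y ∈ p
  · simp [List.contains_eq_mem, PySem.Set.mem_ofList, hy]
  · have : (PySem.Set.ofList p).contains y = false := by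
      simp [List.contains_eq_mem, PySem.Set.mem_ofList, hy]
    simp [hy]

lemma aStep_pair (votes : List String) (l : List String) (m : Int) (choice : String) :
    aStep votes (l, m) choice =
      if cnt votes choice > m then ([choice], cnt votes choice)
      else if choice ∉ l ∧ cnt votes choice = m then (l ++ [choice], m)
      else (l, m) := rfl

-- the invariant of A's loop: after any prefix p the state is
-- (first occurrences in p whose full-list count equals the running max, the running max)
lemma loopA_inv (votes p : List String) :
    p.foldl (aStep votes) ([], 0) =
      ((PySem.List.dedup p).filter (fun x => decide (cnt votes x = runMax votes p)),
       runMax votes p) := by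
  induction p using List.reverseRecOn with
  | nil => simp [runMax, PySem.List.dedup]
  | append_singleton p y ih =>
    rw [List.foldl_append, List.foldl_cons, List.foldl_nil, ih, runMax_append,
        dedup_append_singleton, aStep_pair]
    set m := runMax votes p with hm
    set k := cnt votes y with hk
    by_cases hgt : k > m
    · -- new maximum: state resets to ([y], k)
      have hymem : y ∉ p := fun hy => absurd (cnt_le_runMax votes p hy) (by omega)
      have hmax : max m k = k := by omega
      have hnil : (PySem.List.dedup p).filter (fun x => decide (cnt votes x = k)) = [] := by
        refine List.filter_eq_nil_iff.2 (fun x hx => ?_)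
        have := cnt_le_runMax votes p ((PySem.List.mem_dedup p x).1 hx)
        simp only [decide_eq_true_eq]
        omega
      rw [if_pos hgt, if_neg hymem, hmax, List.filter_append, hnil]
      simp [← hk]
    · -- k ≤ m
      have hle : k ≤ m := by omega
      have hmax : max m k = m := by omega
      rw [if_neg hgt, hmax]
      by_cases hbr : y ∉ (PySem.List.dedup p).filter (fun x => decide (cnt votes x = m)) ∧ k = m
      · -- tie with the max, first occurrence: append y
        have hymem : y ∉ p := by
          intro hy
          exact hbr.1 (List.mem_filter.2 ⟨(PySem.List.mem_dedup p y).2 hy, by simp only [decide_eq_true_eq]; rw [← hk]; exact hbr.2⟩)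
        rw [if_pos hbr, if_neg hymem, List.filter_append]
        have hcy : cnt votes y = m := by rw [← hk]; exact hbr.2
        simp [hcy]
      · -- no change
        rw [if_neg hbr]
        by_cases hy : y ∈ p
        · rw [if_pos hy]
        · have hkne : k ≠ m := by
            intro hkm
            exact hbr ⟨fun hmem => hy ((PySem.List.mem_dedup p y).1 (List.mem_filter.1 hmem).1), hkm⟩
          rw [if_neg hy, List.filter_append]
          have hcy : ¬ cnt votes y = m := by rw [← hk]; exact hkne
          simp [hcy]

lemma cnt_pos (votes : List String) {x : String} (hx : x ∈ votes) : 1 ≤ cnt votes x := by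
  simp only [cnt, PySem.List.count_eq]
  exact_mod_cast List.count_pos_iff.2 hx

-- B's maxcount (max of the counter's values, default 0) is A's final running max
lemma maxD_values_eq_runMax (votes : List String) :
    PySem.List.maxD ((PySem.List.dedup votes).map (cnt votes)) (fun v => v) 0 =
      runMax votes votes := by
  cases hv : votes with
  | nil => simp [PySem.List.maxD, PySem.List.max?, runMax, PySem.List.dedup]
  | cons a t =>
    rw [← hv]
    have hne : votes ≠ [] := by simp [hv]
    have hdne : (PySem.List.dedup votes).map (cnt votes) ≠ [] := by
      simp only [ne_eq, List.map_eq_nil_iff]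
      intro h
      have ha : a ∈ PySem.List.dedup votes := (PySem.List.mem_dedup votes a).2 (by simp [hv])
      rw [h] at ha
      simp at ha
    obtain ⟨v, hv'⟩ : ∃ v, PySem.List.max? ((PySem.List.dedup votes).map (cnt votes)) (fun v => v) = some v := by
      cases h : PySem.List.max? ((PySem.List.dedup votes).map (cnt votes)) (fun v => v) with
      | none => exact absurd ((PySem.List.max?_eq_none_iff _ _).1 h) hdne
      | some v => exact ⟨v, rfl⟩
    rw [PySem.List.maxD, hv', Option.getD_some]
    have hmem := PySem.List.max?_mem hv'
    obtain ⟨x, hxd, hxv⟩ := List.mem_map.1 hmem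
    have hxin : x ∈ votes := (PySem.List.mem_dedup votes x).1 hxd
    have hle1 : v ≤ runMax votes votes := hxv ▸ cnt_le_runMax votes votes hxin
    have hle2 : runMax votes votes ≤ v := by
      have hmm : runMax votes votes = List.foldl max 0 (votes.map (cnt votes)) := by
        simp [runMax, List.foldl_map]
      rcases PySem.List.foldl_max_mem (votes.map (cnt votes)) 0 with h0 | hmemb
      · -- running max stayed 0: v is the count of some actual vote, hence ≥ 1
        rw [hmm, h0]
        have := cnt_pos votes hxin
        omega
      · obtain ⟨z, hz, hzv⟩ := List.mem_map.1 hmemb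
        have : cnt votes z ∈ (PySem.List.dedup votes).map (cnt votes) :=
          List.mem_map.2 ⟨z, (PySem.List.mem_dedup votes z).2 hz, rfl⟩
        have := PySem.List.max?_isMax hv' _ this
        rw [hmm, ← hzv]
        exact this
    omega

lemma filterMap_if_eq_filter (l : List String) (f : String → Int) (m : Int) :
    l.filterMap (fun k => if f k = m then some k else none) =
      l.filter (fun k => decide (f k = m)) := by
  induction l with
  | nil => rfl
  | cons a t ih =>
    by_cases h : f a = m <;> simp [h, ih]

-- B computed in closed form: the first occurrences whose count equals maxcount
lemma altB_eq (votes : List String) :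
    mostVotes_alt votes =
      (PySem.List.dedup votes).filter
        (fun x => decide (cnt votes x =
          PySem.List.maxD ((PySem.List.dedup votes).map (cnt votes)) (fun v => v) 0)) := by
  have hitems : (PySem.Dict.counter votes).items =
      (PySem.List.dedup votes).map (fun k => (k, cnt votes k)) := by
    rw [PySem.Dict.items_counter, PySem.List.dedup_eq_ofList]
    simp [cnt, PySem.List.count_eq]
  have hvals : (PySem.Dict.counter votes).values =
      (PySem.List.dedup votes).map (cnt votes) := by
    simp [PySem.Dict.values, hitems, Function.comp]
  simp only [mostVotes_alt, ← PySem.Dict.counter_eq_foldl, hitems, hvals,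
    List.filterMap_map]
  exact filterMap_if_eq_filter _ _ _

-- ===== VERDICT (by name: the statement is the Claim_ definition above) =====
theorem mostVotes_spec : Claim_equal_mostVotes := by
  intro votes _
  show mostVotes votes = mostVotes_alt votes
  rw [altB_eq, maxD_values_eq_runMax]
  unfold mostVotes
  rw [loopA_inv]
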